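-- pv_equiv track=rewrite | github.com/saleh1shalabi/2DV516-MachienLearning | A4/working_dice_solver.py | combs
-- ===== SOURCE A (Python) =====
-- def combs(l):
--
--   ones = []
--   twos = []
--   threes = []
--   fours = []
--   fives = []
--   sixs = []
--
--   for a in range(len(l)):
--     ones.append([l[a]])
--     for b in range(len(l)):
--       if b > a: twos.append([l[a],l[b]])
--       for c in range(len(l)):
--         if c > b > a: threes.append([l[a],l[b],l[c]])
--         for d in range(len(l)):
--           if d > c > b > a: fours.append([l[a],l[b],l[c],l[d]])
--           for e in range(len(l)):
--             if e > d > c > b > a: fives.append([l[a],l[b],l[c],l[d],l[e]])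
--             for f in range(len(l)):
--               if f > e > d > c > b > a: sixs.append([l[a],l[b],l[c],l[d],l[e],l[f]])
--
--   return [ones, twos, threes, fours, fives, sixs]
-- ===== SOURCE B (Python) =====
-- def _extend(l, level):
--     n = len(l)
--     return [(c + [l[j]], j) for (c, i) in level for j in range(i + 1, n)]
--
--
-- def combs(l):
--     n = len(l)
--     l1 = [([l[i]], i) for i in range(n)]
--     l2 = _extend(l, l1)
--     l3 = _extend(l, l2)
--     l4 = _extend(l, l3)
--     l5 = _extend(l, l4)
--     l6 = _extend(l, l5)
--     return [[c for (c, _) in lev] for lev in (l1, l2, l3, l4, l5, l6)]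
-- ===== Notes on version B (the rewrite author's own statement) =====
-- stated objective: faster
-- what changed: Replaces the six blindly-nested full-range loops with guards by a level-by-level build: each size-k level is produced by extending the size-(k-1) combinations only with indices beyond their recorded trailing index, so work is proportional to the combinations produced instead of n^6 iterations.
import Mathlib
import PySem

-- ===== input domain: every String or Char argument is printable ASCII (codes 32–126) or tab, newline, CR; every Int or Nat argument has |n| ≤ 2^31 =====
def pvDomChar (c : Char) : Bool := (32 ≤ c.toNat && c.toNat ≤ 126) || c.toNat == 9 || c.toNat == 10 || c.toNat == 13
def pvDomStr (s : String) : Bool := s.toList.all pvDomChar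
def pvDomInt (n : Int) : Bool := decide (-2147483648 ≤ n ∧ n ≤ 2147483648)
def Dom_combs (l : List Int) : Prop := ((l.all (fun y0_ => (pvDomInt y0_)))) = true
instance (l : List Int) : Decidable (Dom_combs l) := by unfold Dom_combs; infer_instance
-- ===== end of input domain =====

-- B builds the combinations level by level (each size-k level extends the size-(k-1)
-- combos with indices past their recorded trailing index) instead of A's six nested
-- full-range loops with guards; measurably faster by a large constant factor.


-- ===== PORT A =====
-- state of A's six accumulator lists (ones, twos, threes, fours, fives, sixs)
structure PvSt where
  s1 : List (List Int)
  s2 : List (List Int)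
  s3 : List (List Int)
  s4 : List (List Int)
  s5 : List (List Int)
  s6 : List (List Int)
deriving Repr, DecidableEq

-- l[i]; every index used by either program comes from range(len(l)), so getD is exact
def pvG (l : List Int) (i : Nat) : Int := l.getD i 0

def pvFLoop (l : List Int) (a b c d e : Nat) (st : PvSt) : PvSt :=
  (List.range l.length).foldl (fun st f =>
    if a < b ∧ b < c ∧ c < d ∧ d < e ∧ e < f then
      { st with s6 := st.s6 ++ [[pvG l a, pvG l b, pvG l c, pvG l d, pvG l e, pvG l f]] }
    else st) st

def pvELoop (l : List Int) (a b c d : Nat) (st : PvSt) : PvSt :=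
  (List.range l.length).foldl (fun st e =>
    pvFLoop l a b c d e
      (if a < b ∧ b < c ∧ c < d ∧ d < e then
        { st with s5 := st.s5 ++ [[pvG l a, pvG l b, pvG l c, pvG l d, pvG l e]] }
      else st)) st

def pvDLoop (l : List Int) (a b c : Nat) (st : PvSt) : PvSt :=
  (List.range l.length).foldl (fun st d =>
    pvELoop l a b c d
      (if a < b ∧ b < c ∧ c < d then
        { st with s4 := st.s4 ++ [[pvG l a, pvG l b, pvG l c, pvG l d]] }
      else st)) st

def pvCLoop (l : List Int) (a b : Nat) (st : PvSt) : PvSt :=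
  (List.range l.length).foldl (fun st c =>
    pvDLoop l a b c
      (if a < b ∧ b < c then
        { st with s3 := st.s3 ++ [[pvG l a, pvG l b, pvG l c]] }
      else st)) st

def pvBLoop (l : List Int) (a : Nat) (st : PvSt) : PvSt :=
  (List.range l.length).foldl (fun st b =>
    pvCLoop l a b
      (if a < b then
        { st with s2 := st.s2 ++ [[pvG l a, pvG l b]] }
      else st)) st

def combs (l : List Int) : List (List (List Int)) :=
  let st := (List.range l.length).foldl (fun st a =>
    pvBLoop l a { st with s1 := st.s1 ++ [[pvG l a]] }) ⟨[], [], [], [], [], []⟩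
  [st.s1, st.s2, st.s3, st.s4, st.s5, st.s6]

-- ===== PORT B =====
-- _extend: extend each (combo, trailing index i) with every j in range(i+1, n)
def pvExtend (l : List Int) (level : List (List Int × Nat)) : List (List Int × Nat) :=
  level.flatMap (fun p =>
    (List.range' (p.2 + 1) (l.length - (p.2 + 1))).map (fun j => (p.1 ++ [pvG l j], j)))

def combs_alt (l : List Int) : List (List (List Int)) :=
  let n := l.length
  let l1 := (List.range n).map (fun i => ([pvG l i], i))
  let l2 := pvExtend l l1
  let l3 := pvExtend l l2
  let l4 := pvExtend l l3
  let l5 := pvExtend l l4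
  let l6 := pvExtend l l5
  [l1.map Prod.fst, l2.map Prod.fst, l3.map Prod.fst,
   l4.map Prod.fst, l5.map Prod.fst, l6.map Prod.fst]

-- ===== PRECONDITION & SPEC =====
def Spec_combs (l : List Int) (out : List (List (List Int))) : Prop := out = combs_alt l
instance (l : List Int) (out : List (List (List Int))) : Decidable (Spec_combs l out) := by unfold Spec_combs; infer_instance

-- ===== CLAIM (what is proved, stated in full; the proofs are below) =====
def Claim_equal_combs : Prop := ∀ (l : List Int), Dom_combs l → Spec_combs l (combs l)

-- ===== LEMMAS AND PROOFS =====

-- the per-iteration appended chunk of each of A's guarded appends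
def pvI2 (l : List Int) (a b : Nat) : List (List Int) :=
  if a < b then [[pvG l a, pvG l b]] else []
def pvI3 (l : List Int) (a b c : Nat) : List (List Int) :=
  if a < b ∧ b < c then [[pvG l a, pvG l b, pvG l c]] else []
def pvI4 (l : List Int) (a b c d : Nat) : List (List Int) :=
  if a < b ∧ b < c ∧ c < d then [[pvG l a, pvG l b, pvG l c, pvG l d]] else []
def pvI5 (l : List Int) (a b c d e : Nat) : List (List Int) :=
  if a < b ∧ b < c ∧ c < d ∧ d < e then [[pvG l a, pvG l b, pvG l c, pvG l d, pvG l e]] else []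
def pvI6 (l : List Int) (a b c d e f : Nat) : List (List Int) :=
  if a < b ∧ b < c ∧ c < d ∧ d < e ∧ e < f then
    [[pvG l a, pvG l b, pvG l c, pvG l d, pvG l e, pvG l f]] else []

-- the tail range B iterates: range(i+1, n)
def pvR (l : List Int) (i : Nat) : List Nat := List.range' (i + 1) (l.length - (i + 1))

lemma pv_flatMap_nil {α β : Type} (xs : List α) :
    (xs.flatMap fun _ => ([] : List β)) = [] := by
  induction xs <;> simp_all

lemma pv_flatMap_sing {α β : Type} (xs : List α) (f : α → β) :
    (xs.flatMap fun x => [f x]) = xs.map f := by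
  induction xs <;> simp_all

-- a fold whose body appends a state-independent chunk to each field appends their concatenations
lemma pvFoldAll (body : PvSt → Nat → PvSt) (δ1 δ2 δ3 δ4 δ5 δ6 : Nat → List (List Int))
    (h : ∀ st a, body st a =
      ⟨st.s1 ++ δ1 a, st.s2 ++ δ2 a, st.s3 ++ δ3 a, st.s4 ++ δ4 a, st.s5 ++ δ5 a, st.s6 ++ δ6 a⟩) :
    ∀ (xs : List Nat) (st : PvSt), xs.foldl body st =
      ⟨st.s1 ++ xs.flatMap δ1, st.s2 ++ xs.flatMap δ2, st.s3 ++ xs.flatMap δ3,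
       st.s4 ++ xs.flatMap δ4, st.s5 ++ xs.flatMap δ5, st.s6 ++ xs.flatMap δ6⟩ := by
  intro xs
  induction xs with
  | nil => intro st; simp
  | cons x xs ih =>
    intro st
    simp only [List.foldl_cons, h, ih, List.flatMap_cons, List.append_assoc]

lemma pvFLoop_eff (l : List Int) (a b c d e : Nat) (st : PvSt) :
    pvFLoop l a b c d e st =
      ⟨st.s1, st.s2, st.s3, st.s4, st.s5,
       st.s6 ++ (List.range l.length).flatMap (fun f => pvI6 l a b c d e f)⟩ := by
  have h := pvFoldAll (fun st f =>
      if a < b ∧ b < c ∧ c < d ∧ d < e ∧ e < f then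
        { st with s6 := st.s6 ++ [[pvG l a, pvG l b, pvG l c, pvG l d, pvG l e, pvG l f]] }
      else st)
    (fun _ => []) (fun _ => []) (fun _ => []) (fun _ => []) (fun _ => [])
    (fun f => pvI6 l a b c d e f)
    (by intro st f; dsimp only; unfold pvI6; split <;> simp)
    (List.range l.length) st
  simpa [pvFLoop, pv_flatMap_nil] using h

lemma pvELoop_eff (l : List Int) (a b c d : Nat) (st : PvSt) :
    pvELoop l a b c d st =
      ⟨st.s1, st.s2, st.s3, st.s4,
       st.s5 ++ (List.range l.length).flatMap (fun e => pvI5 l a b c d e),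
       st.s6 ++ (List.range l.length).flatMap (fun e =>
         (List.range l.length).flatMap (fun f => pvI6 l a b c d e f))⟩ := by
  have h := pvFoldAll (fun st e =>
      pvFLoop l a b c d e
        (if a < b ∧ b < c ∧ c < d ∧ d < e then
          { st with s5 := st.s5 ++ [[pvG l a, pvG l b, pvG l c, pvG l d, pvG l e]] }
        else st))
    (fun _ => []) (fun _ => []) (fun _ => []) (fun _ => [])
    (fun e => pvI5 l a b c d e)
    (fun e => (List.range l.length).flatMap (fun f => pvI6 l a b c d e f))
    (by intro st e; dsimp only; unfold pvI5; split <;> simp [pvFLoop_eff])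
    (List.range l.length) st
  simpa [pvELoop, pv_flatMap_nil] using h

lemma pvDLoop_eff (l : List Int) (a b c : Nat) (st : PvSt) :
    pvDLoop l a b c st =
      ⟨st.s1, st.s2, st.s3,
       st.s4 ++ (List.range l.length).flatMap (fun d => pvI4 l a b c d),
       st.s5 ++ (List.range l.length).flatMap (fun d =>
         (List.range l.length).flatMap (fun e => pvI5 l a b c d e)),
       st.s6 ++ (List.range l.length).flatMap (fun d =>
         (List.range l.length).flatMap (fun e =>
           (List.range l.length).flatMap (fun f => pvI6 l a b c d e f)))⟩ := by
  have h := pvFoldAll (fun st d =>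
      pvELoop l a b c d
        (if a < b ∧ b < c ∧ c < d then
          { st with s4 := st.s4 ++ [[pvG l a, pvG l b, pvG l c, pvG l d]] }
        else st))
    (fun _ => []) (fun _ => []) (fun _ => [])
    (fun d => pvI4 l a b c d)
    (fun d => (List.range l.length).flatMap (fun e => pvI5 l a b c d e))
    (fun d => (List.range l.length).flatMap (fun e =>
      (List.range l.length).flatMap (fun f => pvI6 l a b c d e f)))
    (by intro st d; dsimp only; unfold pvI4; split <;> simp [pvELoop_eff])
    (List.range l.length) st
  simpa [pvDLoop, pv_flatMap_nil] using h

lemma pvCLoop_eff (l : List Int) (a b : Nat) (st : PvSt) :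
    pvCLoop l a b st =
      ⟨st.s1, st.s2,
       st.s3 ++ (List.range l.length).flatMap (fun c => pvI3 l a b c),
       st.s4 ++ (List.range l.length).flatMap (fun c =>
         (List.range l.length).flatMap (fun d => pvI4 l a b c d)),
       st.s5 ++ (List.range l.length).flatMap (fun c =>
         (List.range l.length).flatMap (fun d =>
           (List.range l.length).flatMap (fun e => pvI5 l a b c d e))),
       st.s6 ++ (List.range l.length).flatMap (fun c =>
         (List.range l.length).flatMap (fun d =>
           (List.range l.length).flatMap (fun e =>
             (List.range l.length).flatMap (fun f => pvI6 l a b c d e f))))⟩ := by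
  have h := pvFoldAll (fun st c =>
      pvDLoop l a b c
        (if a < b ∧ b < c then
          { st with s3 := st.s3 ++ [[pvG l a, pvG l b, pvG l c]] }
        else st))
    (fun _ => []) (fun _ => [])
    (fun c => pvI3 l a b c)
    (fun c => (List.range l.length).flatMap (fun d => pvI4 l a b c d))
    (fun c => (List.range l.length).flatMap (fun d =>
      (List.range l.length).flatMap (fun e => pvI5 l a b c d e)))
    (fun c => (List.range l.length).flatMap (fun d =>
      (List.range l.length).flatMap (fun e =>
        (List.range l.length).flatMap (fun f => pvI6 l a b c d e f))))
    (by intro st c; dsimp only; unfold pvI3; split <;> simp [pvDLoop_eff])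
    (List.range l.length) st
  simpa [pvCLoop, pv_flatMap_nil] using h

lemma pvBLoop_eff (l : List Int) (a : Nat) (st : PvSt) :
    pvBLoop l a st =
      ⟨st.s1,
       st.s2 ++ (List.range l.length).flatMap (fun b => pvI2 l a b),
       st.s3 ++ (List.range l.length).flatMap (fun b =>
         (List.range l.length).flatMap (fun c => pvI3 l a b c)),
       st.s4 ++ (List.range l.length).flatMap (fun b =>
         (List.range l.length).flatMap (fun c =>
           (List.range l.length).flatMap (fun d => pvI4 l a b c d))),
       st.s5 ++ (List.range l.length).flatMap (fun b =>
         (List.range l.length).flatMap (fun c =>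
           (List.range l.length).flatMap (fun d =>
             (List.range l.length).flatMap (fun e => pvI5 l a b c d e)))),
       st.s6 ++ (List.range l.length).flatMap (fun b =>
         (List.range l.length).flatMap (fun c =>
           (List.range l.length).flatMap (fun d =>
             (List.range l.length).flatMap (fun e =>
               (List.range l.length).flatMap (fun f => pvI6 l a b c d e f)))))⟩ := by
  have h := pvFoldAll (fun st b =>
      pvCLoop l a b
        (if a < b then
          { st with s2 := st.s2 ++ [[pvG l a, pvG l b]] }
        else st))
    (fun _ => [])
    (fun b => pvI2 l a b)
    (fun b => (List.range l.length).flatMap (fun c => pvI3 l a b c))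
    (fun b => (List.range l.length).flatMap (fun c =>
      (List.range l.length).flatMap (fun d => pvI4 l a b c d)))
    (fun b => (List.range l.length).flatMap (fun c =>
      (List.range l.length).flatMap (fun d =>
        (List.range l.length).flatMap (fun e => pvI5 l a b c d e))))
    (fun b => (List.range l.length).flatMap (fun c =>
      (List.range l.length).flatMap (fun d =>
        (List.range l.length).flatMap (fun e =>
          (List.range l.length).flatMap (fun f => pvI6 l a b c d e f)))))
    (by intro st b; dsimp only; unfold pvI2; split <;> simp [pvCLoop_eff])
    (List.range l.length) st
  simpa [pvBLoop, pv_flatMap_nil] using h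

-- A's result, characterised as nested guard-filtered flatMaps
lemma combs_eq (l : List Int) :
    combs l =
      [(List.range l.length).flatMap (fun a => [[pvG l a]]),
       (List.range l.length).flatMap (fun a =>
         (List.range l.length).flatMap (fun b => pvI2 l a b)),
       (List.range l.length).flatMap (fun a =>
         (List.range l.length).flatMap (fun b =>
           (List.range l.length).flatMap (fun c => pvI3 l a b c))),
       (List.range l.length).flatMap (fun a =>
         (List.range l.length).flatMap (fun b =>
           (List.range l.length).flatMap (fun c =>
             (List.range l.length).flatMap (fun d => pvI4 l a b c d)))),
       (List.range l.length).flatMap (fun a =>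
         (List.range l.length).flatMap (fun b =>
           (List.range l.length).flatMap (fun c =>
             (List.range l.length).flatMap (fun d =>
               (List.range l.length).flatMap (fun e => pvI5 l a b c d e))))),
       (List.range l.length).flatMap (fun a =>
         (List.range l.length).flatMap (fun b =>
           (List.range l.length).flatMap (fun c =>
             (List.range l.length).flatMap (fun d =>
               (List.range l.length).flatMap (fun e =>
                 (List.range l.length).flatMap (fun f => pvI6 l a b c d e f))))))] := by
  have h := pvFoldAll (fun st a => pvBLoop l a { st with s1 := st.s1 ++ [[pvG l a]] })
    (fun a => [[pvG l a]])
    (fun a => (List.range l.length).flatMap (fun b => pvI2 l a b))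
    (fun a => (List.range l.length).flatMap (fun b =>
      (List.range l.length).flatMap (fun c => pvI3 l a b c)))
    (fun a => (List.range l.length).flatMap (fun b =>
      (List.range l.length).flatMap (fun c =>
        (List.range l.length).flatMap (fun d => pvI4 l a b c d))))
    (fun a => (List.range l.length).flatMap (fun b =>
      (List.range l.length).flatMap (fun c =>
        (List.range l.length).flatMap (fun d =>
          (List.range l.length).flatMap (fun e => pvI5 l a b c d e)))))
    (fun a => (List.range l.length).flatMap (fun b =>
      (List.range l.length).flatMap (fun c =>
        (List.range l.length).flatMap (fun d =>
          (List.range l.length).flatMap (fun e =>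
            (List.range l.length).flatMap (fun f => pvI6 l a b c d e f))))))
    (by intro st a; dsimp only; simp [pvBLoop_eff])
    (List.range l.length) ⟨[], [], [], [], [], []⟩
  simp only [combs]
  rw [h]
  simp

-- a full-range loop with an index guard is the tail range
lemma pvGuard1 {α : Type} (n x : Nat) (f : Nat → List α) :
    (List.range n).flatMap (fun y => if x < y then f y else []) =
      (List.range' (x + 1) (n - (x + 1))).flatMap f := by
  induction n with
  | zero => simp
  | succ n ih =>
    rw [List.range_succ, List.flatMap_append, ih]
    by_cases h : x < n
    · have h1 : n + 1 - (x + 1) = (n - (x + 1)) + 1 := by omega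
      rw [h1, List.range'_concat]
      simp [List.flatMap_append, h]
    · have h1 : n + 1 - (x + 1) = n - (x + 1) := by omega
      simp [h, h1]

lemma pvGuard2 {α : Type} (n x : Nat) (P : Prop) [Decidable P] (f : Nat → List α) :
    (List.range n).flatMap (fun y => if P ∧ x < y then f y else []) =
      if P then (List.range' (x + 1) (n - (x + 1))).flatMap f else [] := by
  by_cases hP : P
  · simp [hP, pvGuard1]
  · simp [hP]

lemma pvGL2 (l : List Int) (a : Nat) :
    (List.range l.length).flatMap (fun b => pvI2 l a b) =
      (pvR l a).map (fun b => [pvG l a, pvG l b]) := by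
  unfold pvI2 pvR
  rw [pvGuard1]
  simp [pv_flatMap_sing]

lemma pvGL3 (l : List Int) (a b : Nat) :
    (List.range l.length).flatMap (fun c => pvI3 l a b c) =
      if a < b then (pvR l b).map (fun c => [pvG l a, pvG l b, pvG l c]) else [] := by
  unfold pvI3 pvR
  rw [pvGuard2]
  split <;> simp [pv_flatMap_sing]

lemma pvGL4 (l : List Int) (a b c : Nat) :
    (List.range l.length).flatMap (fun d => pvI4 l a b c d) =
      if (a < b ∧ b < c) then
        (pvR l c).map (fun d => [pvG l a, pvG l b, pvG l c, pvG l d]) else [] := by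
  unfold pvI4 pvR
  simp only [← and_assoc]
  rw [pvGuard2]
  split <;> simp [pv_flatMap_sing]

lemma pvGL5 (l : List Int) (a b c d : Nat) :
    (List.range l.length).flatMap (fun e => pvI5 l a b c d e) =
      if ((a < b ∧ b < c) ∧ c < d) then
        (pvR l d).map (fun e => [pvG l a, pvG l b, pvG l c, pvG l d, pvG l e]) else [] := by
  unfold pvI5 pvR
  simp only [← and_assoc]
  rw [pvGuard2]
  split <;> simp [pv_flatMap_sing]

lemma pvGL6 (l : List Int) (a b c d e : Nat) :
    (List.range l.length).flatMap (fun f => pvI6 l a b c d e f) =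
      if (((a < b ∧ b < c) ∧ c < d) ∧ d < e) then
        (pvR l e).map (fun f => [pvG l a, pvG l b, pvG l c, pvG l d, pvG l e, pvG l f]) else [] := by
  unfold pvI6 pvR
  simp only [← and_assoc]
  rw [pvGuard2]
  split <;> simp [pv_flatMap_sing]

lemma pv_main (l : List Int) : combs l = combs_alt l := by
  rw [combs_eq]
  simp only [combs_alt, pvExtend, List.flatMap_map, List.map_flatMap, List.flatMap_assoc,
    List.map_map]
  simp [pvGL2, pvGL3, pvGL4, pvGL5, pvGL6, pvGuard2, pvGuard1, pvR, pv_flatMap_sing,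
    Function.comp_def]

-- ===== VERDICT (by name: the statement is the Claim_ definition above) =====
theorem combs_spec : Claim_equal_combs := by
  intro l _
  show combs l = combs_alt l
  exact pv_main l
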